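-- pv_equiv track=rewrite | github.com/0xronaldo/JuezVirtualPython | Final_excersis_b179/main2.py | max_mushrooms
-- ===== SOURCE A (Python) =====
-- def max_mushrooms(n, t, mushrooms):
--     if t == 0:
--         return mushrooms[0]
--     prefix_sum = [0] * (n + 1)
--     for i in range(n):
--         prefix_sum[i + 1] = prefix_sum[i] + mushrooms[i]
--
--     max_mushrooms = mushrooms[0]
--     for k in range(1, min(n, t + 1)):
--         moves_used = k - 1
--         segment_sum = prefix_sum[k]
--         moves_left = t - moves_used
--
--         # Segmento contiguo
--         max_mushrooms = max(max_mushrooms, segment_sum)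
--
--         if moves_left >= 1:
--             for i in range(k):
--                 moves_to_i = abs(i - (k - 1))
--                 if moves_to_i <= moves_left:
--
--                     if moves_used + moves_to_i >= i + 2 or i == 0:  # Claro 0 visitado en t=0
--                         max_mushrooms = max(max_mushrooms, segment_sum + mushrooms[i])
--
--     return max_mushrooms
-- ===== SOURCE B (Python) =====
-- def max_mushrooms(n, t, mushrooms):
--     # O(min(n,t)) sliding-window maximum (monotonic deque) instead of A's
--     # quadratic inner scan; same return value for every input A accepts.
--     if t == 0:
--         return mushrooms[0]
--     best = mushrooms[0]
--     prefix = 0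
--     dq = []      # candidate indices, front at dq[head]; values non-increasing
--     head = 0
--     limit = min(n, t + 1)
--     for k in range(1, limit):
--         prefix += mushrooms[k - 1]
--         j = k - 2
--         if j >= 0:
--             while len(dq) > head and mushrooms[dq[-1]] <= mushrooms[j]:
--                 dq.pop()
--             dq.append(j)
--         low = 2 * k - 2 - t
--         while len(dq) > head and dq[head] < low:
--             head += 1
--         best = max(best, prefix)
--         if len(dq) > head:
--             best = max(best, prefix + mushrooms[dq[head]])
--         if 2 * k - 2 <= t:
--             best = max(best, prefix + mushrooms[0])
--     return best
-- ===== Notes on version B (the rewrite author's own statement) =====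
-- stated objective: faster
-- what changed: A rescans all k previous indices at every step; B keeps a monotonic-deque sliding-window maximum over the closed-form index window [max(0,2k-2-t), k-2] (plus the i=0 case), turning the O(min(n,t)^2) double loop into a single amortized O(1)-per-step pass.
import Mathlib
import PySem

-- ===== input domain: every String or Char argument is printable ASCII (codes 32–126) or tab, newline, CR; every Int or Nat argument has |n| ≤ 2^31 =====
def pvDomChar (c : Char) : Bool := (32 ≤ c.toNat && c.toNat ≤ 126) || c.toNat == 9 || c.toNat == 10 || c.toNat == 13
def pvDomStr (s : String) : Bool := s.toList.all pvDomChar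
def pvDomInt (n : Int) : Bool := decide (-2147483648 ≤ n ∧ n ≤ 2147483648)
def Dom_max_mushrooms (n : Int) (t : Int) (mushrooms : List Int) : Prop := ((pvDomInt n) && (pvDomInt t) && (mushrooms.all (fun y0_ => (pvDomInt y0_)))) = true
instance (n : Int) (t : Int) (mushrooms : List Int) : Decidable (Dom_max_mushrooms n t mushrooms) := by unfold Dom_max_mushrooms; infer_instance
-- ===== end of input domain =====

-- B replaces A's quadratic inner scan by a monotonic-deque sliding-window maximum
-- (objective: faster, O(min(n,t)) instead of O(min(n,t)^2) after the prefix sums).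

-- ===== PORT A =====
-- Literal transliteration of A; mushrooms[0], prefix_sum[..], mushrooms[i] use the
-- total pyGetD form, exact under Pre_ (indices in range there).
def max_mushrooms (n : Int) (t : Int) (mushrooms : List Int) : Int :=
  if t = 0 then PySem.List.pyGetD mushrooms 0 0
  else
    let ps0 : List Int := List.replicate (n + 1).toNat 0
    let ps := (PySem.List.pyRange 0 n 1).foldl
      (fun ps i => PySem.List.pySetD ps (i + 1)
        (PySem.List.pyGetD ps i 0 + PySem.List.pyGetD mushrooms i 0)) ps0
    let acc0 := PySem.List.pyGetD mushrooms 0 0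
    (PySem.List.pyRange 1 (min n (t + 1)) 1).foldl (fun acc k =>
      let moves_used := k - 1
      let segment_sum := PySem.List.pyGetD ps k 0
      let moves_left := t - moves_used
      let acc1 := max acc segment_sum
      if moves_left ≥ 1 then
        (PySem.List.pyRange 0 k 1).foldl (fun acc i =>
          let moves_to_i := |i - (k - 1)|
          if moves_to_i ≤ moves_left then
            if moves_used + moves_to_i ≥ i + 2 ∨ i = 0 then
              max acc (segment_sum + PySem.List.pyGetD mushrooms i 0)
            else acc
          else acc) acc1
      else acc1) acc0

-- ===== PORT B =====
-- Transliteration of Source B.  Source B's (dq, head) deque — a list whose consumed front is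
-- marked by the head pointer — is modeled by the list of live elements: Python's
-- 'while len(dq)>head and dq[head] < low: head += 1' is dropWhile at the front, and
-- 'while dq and m[dq[-1]] <= m[j]: dq.pop()' is dropWhile on the reversed list.
def max_mushrooms_alt (n : Int) (t : Int) (mushrooms : List Int) : Int :=
  if t = 0 then PySem.List.pyGetD mushrooms 0 0
  else
    let limit := min n (t + 1)
    ((PySem.List.pyRange 1 limit 1).foldl (fun (s : Int × Int × List Int) k =>
      let pfx := s.2.1 + PySem.List.pyGetD mushrooms (k - 1) 0
      let j := k - 2
      let dq :=
        if 0 ≤ j then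
          (s.2.2.reverse.dropWhile (fun d =>
            PySem.List.pyGetD mushrooms d 0 ≤ PySem.List.pyGetD mushrooms j 0)).reverse ++ [j]
        else s.2.2
      let low := 2 * k - 2 - t
      let dq := dq.dropWhile (fun d => d < low)
      let best := max s.1 pfx
      let best := match dq with
        | d :: _ => max best (pfx + PySem.List.pyGetD mushrooms d 0)
        | [] => best
      let best := if 2 * k - 2 ≤ t then max best (pfx + PySem.List.pyGetD mushrooms 0 0) else best
      (best, pfx, dq))
      (PySem.List.pyGetD mushrooms 0 0, 0, ([] : List Int))).1

-- ===== PRECONDITION & SPEC =====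
-- Pre_ excludes exactly the inputs where A raises IndexError: empty mushrooms, and
-- (when t ≠ 0) n exceeding the list length.
def Pre_max_mushrooms (n : Int) (t : Int) (mushrooms : List Int) : Prop :=
  mushrooms ≠ [] ∧ (t = 0 ∨ n ≤ (mushrooms.length : Int))
instance (n : Int) (t : Int) (mushrooms : List Int) : Decidable (Pre_max_mushrooms n t mushrooms) := by
  unfold Pre_max_mushrooms; infer_instance

def pvWitness_max_mushrooms : Int × Int × List Int := (4, 3, [2, -1, 5, 3])

def Spec_max_mushrooms (n : Int) (t : Int) (mushrooms : List Int) (out : Int) : Prop := out = max_mushrooms_alt n t mushrooms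
instance (n : Int) (t : Int) (mushrooms : List Int) (out : Int) : Decidable (Spec_max_mushrooms n t mushrooms out) := by unfold Spec_max_mushrooms; infer_instance

-- ===== CLAIM (what is proved, stated in full; the proofs are below) =====
def Claim_equal_max_mushrooms : Prop := ∀ (n : Int) (t : Int) (mushrooms : List Int), Dom_max_mushrooms n t mushrooms → Pre_max_mushrooms n t mushrooms → Spec_max_mushrooms n t mushrooms (max_mushrooms n t mushrooms)

-- ===== LEMMAS AND PROOFS =====

-- mushrooms[i] (total form) and the sum of the first k mushrooms
def pvV (mush : List Int) (i : Int) : Int := PySem.List.pyGetD mush i 0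
def pvPS (mush : List Int) (k : Int) : Int := (mush.take k.toNat).sum
-- the index window A's inner loop effectively maximises over at step k (plus index 0)
def pvWin (t k : Int) : List Int := PySem.List.pyRange (max 0 (2*k-2-t)) (k-1) 1
def pvExtra (t k : Int) : List Int := if 2*k-2 ≤ t then [(0:Int)] else []
-- reference step: best ⊔ segment sum ⊔ (segment sum + mushrooms[i] over window ∪ extra)
def pvStep (mush : List Int) (t : Int) (acc k : Int) : Int :=
  (pvWin t k ++ pvExtra t k).foldl (fun a i => max a (pvPS mush k + pvV mush i)) (max acc (pvPS mush k))

-- deque invariant after step k: members lie in the window [max 0 (2k-2-t), k-2],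
-- indices increase, values do not increase, and every window index is dominated
def pvInv (mush : List Int) (t k : Int) (dq : List Int) : Prop :=
  (∀ d ∈ dq, 2*k-2-t ≤ d ∧ 0 ≤ d ∧ d ≤ k-2) ∧
  dq.Pairwise (· < ·) ∧
  dq.Pairwise (fun a b => pvV mush b ≤ pvV mush a) ∧
  (∀ j : Int, 2*k-2-t ≤ j → 0 ≤ j → j ≤ k-2 → ∃ d ∈ dq, j ≤ d ∧ pvV mush j ≤ pvV mush d)

-- B's deque update and loop body, named for the proofs (identical to the port's lambda)
def pvStepDq (mush : List Int) (t k : Int) (dq : List Int) : List Int :=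
  let j := k - 2
  let dq1 :=
    if 0 ≤ j then
      (dq.reverse.dropWhile (fun d =>
        PySem.List.pyGetD mush d 0 ≤ PySem.List.pyGetD mush j 0)).reverse ++ [j]
    else dq
  dq1.dropWhile (fun d => d < 2 * k - 2 - t)

def pvStepB (mush : List Int) (t : Int) (s : Int × Int × List Int) (k : Int) : Int × Int × List Int :=
  let pfx := s.2.1 + PySem.List.pyGetD mush (k - 1) 0
  let dq := pvStepDq mush t k s.2.2
  let best := max s.1 pfx
  let best := match dq with
    | d :: _ => max best (pfx + PySem.List.pyGetD mush d 0)
    | [] => best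
  let best := if 2 * k - 2 ≤ t then max best (pfx + PySem.List.pyGetD mush 0 0) else best
  (best, pfx, dq)

theorem pvAlt_eq_foldB (n t : Int) (mush : List Int) (ht : ¬ t = 0) :
    max_mushrooms_alt n t mush =
      ((PySem.List.pyRange 1 (min n (t+1)) 1).foldl (pvStepB mush t)
        (PySem.List.pyGetD mush 0 0, 0, ([] : List Int))).1 := by
  simp only [max_mushrooms_alt, if_neg ht]
  congr 1

-- fold-of-max toolbox
theorem pvFold_ub (g : Int → Int) (l : List Int) (acc c : Int)
    (h1 : acc ≤ c) (h2 : ∀ i ∈ l, g i ≤ c) :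
    l.foldl (fun a i => max a (g i)) acc ≤ c := by
  induction l generalizing acc with
  | nil => exact h1
  | cons x xs ih =>
    simp only [List.foldl_cons]
    exact ih (max acc (g x)) (max_le h1 (h2 x (by simp))) (fun i hi => h2 i (by simp [hi]))

theorem pvFold_lb (g : Int → Int) (l : List Int) (acc : Int) :
    acc ≤ l.foldl (fun a i => max a (g i)) acc ∧
    ∀ i ∈ l, g i ≤ l.foldl (fun a i => max a (g i)) acc := by
  induction l generalizing acc with
  | nil => exact ⟨le_refl _, by simp⟩
  | cons x xs ih =>
    simp only [List.foldl_cons]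
    refine ⟨le_trans (le_max_left _ _) (ih (max acc (g x))).1, ?_⟩
    intro i hi
    rcases List.mem_cons.mp hi with h | h
    · subst h; exact le_trans (le_max_right _ _) (ih (max acc (g i))).1
    · exact (ih (max acc (g x))).2 i h

theorem pvFold_congr_set (g : Int → Int) (l1 l2 : List Int) (acc : Int)
    (h : ∀ i, i ∈ l1 ↔ i ∈ l2) :
    l1.foldl (fun a i => max a (g i)) acc = l2.foldl (fun a i => max a (g i)) acc := by
  have b1 := pvFold_lb g l1 acc
  have b2 := pvFold_lb g l2 acc
  exact le_antisymm
    (pvFold_ub g l1 acc _ b2.1 (fun i hi => b2.2 i ((h i).mp hi)))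
    (pvFold_ub g l2 acc _ b1.1 (fun i hi => b1.2 i ((h i).mpr hi)))


-- the prefix_sum list A builds: after c iterations positions 0..c hold the prefix sums
theorem pvBuild (mush : List Int) (N : Nat) (hN : N ≤ mush.length) :
    ∀ c : Nat, c ≤ N →
    (List.range c).foldl
      (fun ps (i : Nat) => PySem.List.pySetD ps ((i:Int) + 1)
        (PySem.List.pyGetD ps ((i:Int)) 0 + PySem.List.pyGetD mush ((i:Int)) 0))
      (List.replicate (N+1) (0:Int))
    = (List.range (c+1)).map (fun j => ((mush.take j).sum)) ++ List.replicate (N - c) (0:Int) := by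
  intro c
  induction c with
  | zero => intro _; simp [List.replicate_succ]
  | succ c ih =>
    intro hc
    have hc' : c ≤ N := by omega
    rw [List.range_succ, List.foldl_append, ih hc']
    simp only [List.foldl_cons, List.foldl_nil]
    have hlen : ((List.range (c+1)).map (fun j => ((mush.take j).sum : Int))).length = c + 1 := by
      simp
    have hget : PySem.List.pyGetD
        ((List.range (c+1)).map (fun j => ((mush.take j).sum : Int)) ++ List.replicate (N - c) (0:Int))
        ((c : Nat) : Int) 0 = (mush.take c).sum := by
      rw [PySem.List.pyGetD_natCast, List.getD_append _ _ _ c (by simp)]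
      simp [List.getD_eq_getElem?_getD]
    have hcast : ((c : Nat) : Int) + 1 = (((c+1 : Nat)) : Int) := by push_cast; ring
    rw [hget, hcast, PySem.List.pySetD_natCast, List.set_append]
    rw [if_neg (by simp)]
    have hrep : N - c = (N - (c+1)) + 1 := by omega
    rw [hrep, List.replicate_succ, hlen, Nat.sub_self, List.set_cons_zero]
    have htake : (mush.take c).sum + PySem.List.pyGetD mush ((c : Nat) : Int) 0
        = (mush.take (c+1)).sum := by
      have hcl : c < mush.length := by omega
      rw [PySem.List.pyGetD_natCast]
      simp only [List.getD_eq_getElem?_getD, List.getElem?_eq_getElem hcl, Option.getD_some]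
      exact (List.sum_take_succ mush c hcl).symm
    rw [htake]
    rw [List.range_succ (n := c+1), List.map_append]
    simp

-- prefix_sum list A builds, as a map of prefix sums
theorem pvPs_eq (mush : List Int) (n : Int) (hn0 : 0 ≤ n) (hn : n ≤ (mush.length : Int)) :
    (PySem.List.pyRange 0 n 1).foldl
      (fun ps i => PySem.List.pySetD ps (i + 1)
        (PySem.List.pyGetD ps i 0 + PySem.List.pyGetD mush i 0))
      (List.replicate (n + 1).toNat (0:Int))
    = (List.range (n.toNat + 1)).map (fun j => ((mush.take j).sum : Int)) := by
  have h1 : (n + 1).toNat = n.toNat + 1 := by omega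
  rw [h1, PySem.List.pyRange_zero, List.foldl_map]
  rw [pvBuild mush n.toNat (by omega) n.toNat (le_refl _)]
  simp

-- reading prefix_sum[k]
theorem pvSeg (mush : List Int) (n k : Int) (hn : n ≤ (mush.length : Int))
    (hk0 : 0 ≤ k) (hk : k ≤ n) :
    PySem.List.pyGetD
      ((PySem.List.pyRange 0 n 1).foldl
        (fun ps i => PySem.List.pySetD ps (i + 1)
          (PySem.List.pyGetD ps i 0 + PySem.List.pyGetD mush i 0))
        (List.replicate (n + 1).toNat (0:Int))) k 0
    = pvPS mush k := by
  rw [pvPs_eq mush n (by omega) hn]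
  have hlt : k.toNat < n.toNat + 1 := by omega
  rw [PySem.List.pyGetD_eq_getElem _ 0 hk0 (by simp; omega)]
  rw [List.getElem_map]
  simp [pvPS]

-- A's condition set at step k is exactly the window plus index 0
theorem pvMem_iff (t k i : Int) (hk1 : 1 ≤ k) (hkt : k ≤ t) :
    ((0 ≤ i ∧ i < k) ∧ ((0 ≤ i ∧ i < k) ∧ |i - (k-1)| ≤ t - (k-1) ∧ ((k-1) + |i - (k-1)| ≥ i + 2 ∨ i = 0)))
    ↔ ((max 0 (2*k-2-t) ≤ i ∧ i < k - 1) ∨ (2*k-2 ≤ t ∧ i = 0)) := by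
  rcases abs_cases (i - (k-1)) with ⟨h1, h2⟩ | ⟨h1, h2⟩ <;> rw [h1] <;> omega

-- A's t ≠ 0 branch computes the reference fold
theorem pvA_eq_foldSpec (n t : Int) (mush : List Int) (ht : ¬ t = 0)
    (hn : n ≤ (mush.length : Int)) :
    max_mushrooms n t mush =
      (PySem.List.pyRange 1 (min n (t+1)) 1).foldl (pvStep mush t) (pvV mush 0) := by
  simp only [max_mushrooms, if_neg ht]
  apply PySem.List.foldl_congr_mem
  intro acc k hk
  rw [PySem.List.mem_pyRange_one] at hk
  have hk1 : 1 ≤ k := hk.1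
  have hkt : k ≤ t := by omega
  have hkn : k + 1 ≤ n := by omega
  rw [pvSeg mush n k hn (by omega) (by omega)]
  rw [if_pos (by omega : t - (k - 1) ≥ 1)]
  -- single-if form of the inner body
  rw [PySem.List.foldl_congr_mem _ _
    (fun a i => if ((0 ≤ i ∧ i < k) ∧ |i - (k-1)| ≤ t - (k-1) ∧ ((k-1) + |i - (k-1)| ≥ i + 2 ∨ i = 0) : Bool)
      then max a (pvPS mush k + pvV mush i) else a) _
    (by
      intro a i hi
      rw [PySem.List.mem_pyRange_one] at hi
      by_cases h1 : |i - (k-1)| ≤ t - (k-1) <;>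
        by_cases h2 : (k-1) + |i - (k-1)| ≥ i + 2 ∨ i = 0 <;>
          simp [h1, h2, hi.1, hi.2, pvV])]
  rw [← List.foldl_filter]
  unfold pvStep
  apply pvFold_congr_set
  intro i
  rw [List.mem_filter, PySem.List.mem_pyRange_one, List.mem_append, decide_eq_true_iff]
  rw [pvMem_iff t k i hk1 hkt]
  simp only [pvWin, pvExtra, PySem.List.mem_pyRange_one]
  by_cases h2 : 2*k-2 ≤ t <;> simp [h2]

-- dropWhile utilities for the deque
theorem pvMem_dropWhile {α : Type} (p : α → Bool) (l : List α) (x : α)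
    (hx : x ∈ l) (hp : ¬ p x = true) : x ∈ l.dropWhile p := by
  induction l with
  | nil => cases hx
  | cons a l ih =>
    rw [List.dropWhile_cons]
    by_cases ha : p a = true
    · rw [if_pos ha]
      rcases List.mem_cons.mp hx with h | h
      · exact absurd (h ▸ ha) hp
      · exact ih h
    · rw [if_neg ha]; exact hx

theorem pvDropWhile_head {α : Type} (p : α → Bool) (l : List α) (h0 : α) (rest : List α)
    (hr : l.dropWhile p = h0 :: rest) : p h0 = false := by
  induction l with
  | nil => simp at hr
  | cons a l ih =>
    rw [List.dropWhile_cons] at hr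
    by_cases ha : p a = true
    · rw [if_pos ha] at hr; exact ih hr
    · rw [if_neg ha] at hr
      cases hr
      simpa using ha

theorem pvDropWhile_lb (low : Int) (l : List Int) (hl : l.Pairwise (· < ·)) :
    ∀ d ∈ l.dropWhile (fun d => decide (d < low)), low ≤ d := by
  induction l with
  | nil => intro d hd; cases hd
  | cons a l ih =>
    rw [List.dropWhile_cons]
    by_cases ha : a < low
    · simp only [decide_eq_true_eq, if_pos ha]
      exact ih (List.pairwise_cons.mp hl).2
    · simp only [decide_eq_true_eq, if_neg ha]
      intro d hd
      rcases List.mem_cons.mp hd with h | h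
      · omega
      · have := (List.pairwise_cons.mp hl).1 d h; omega

theorem pvInv_empty (mush : List Int) (t k : Int) (dq : List Int)
    (hk : k ≤ 1) (hInv : pvInv mush t k dq) : dq = [] := by
  cases dq with
  | nil => rfl
  | cons d rest =>
    have := hInv.1 d (List.mem_cons_self ..)
    omega

theorem pvInv_head (mush : List Int) (t k : Int) (dq : List Int)
    (hk : 2 ≤ k) (hkt : k ≤ t) (hInv : pvInv mush t k dq) :
    ∃ d0 rest, dq = d0 :: rest ∧
      ∀ j : Int, 2*k-2-t ≤ j → 0 ≤ j → j ≤ k-2 → pvV mush j ≤ pvV mush d0 := by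
  obtain ⟨hmem, hlt, hval, hdom⟩ := hInv
  obtain ⟨d, hd, _, _⟩ := hdom (k-2) (by omega) (by omega) (le_refl _)
  cases dq with
  | nil => cases hd
  | cons d0 rest =>
    refine ⟨d0, rest, rfl, ?_⟩
    intro j hj1 hj2 hj3
    obtain ⟨e, he, _, hve⟩ := hdom j hj1 hj2 hj3
    rcases List.mem_cons.mp he with h | h
    · exact h ▸ hve
    · exact le_trans hve ((List.pairwise_cons.mp hval).1 e h)

-- the deque update preserves the invariant
theorem pvInv_step (mush : List Int) (t k : Int) (dq : List Int)
    (hk1 : 1 ≤ k) (hkt : k ≤ t) (hInv : pvInv mush t (k-1) dq) :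
    pvInv mush t k (pvStepDq mush t k dq) := by
  obtain ⟨hmem, hlt, hval, hdom⟩ := hInv
  unfold pvStepDq
  by_cases hk2 : (0:Int) ≤ k - 2
  case neg =>
    -- k = 1 : dq is empty and stays empty
    have hnil : dq = [] := pvInv_empty mush t (k-1) dq (by omega) ⟨hmem, hlt, hval, hdom⟩
    simp only [if_neg hk2, hnil, List.dropWhile_nil]
    exact ⟨by simp, by simp, by simp, fun j h1 h2 h3 => absurd (by omega : (0:Int) ≤ k-2) hk2⟩
  case pos =>
    simp only [if_pos hk2]
    set p := fun d => decide (pvV mush d ≤ pvV mush (k-2)) with hp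
    set kept := (dq.reverse.dropWhile (fun d =>
      decide (PySem.List.pyGetD mush d 0 ≤ PySem.List.pyGetD mush (k-2) 0))).reverse with hkept
    have hpk : (fun d => decide (PySem.List.pyGetD mush d 0 ≤ PySem.List.pyGetD mush (k-2) 0)) = p := rfl
    -- kept is a sublist of dq
    have hsub : kept.Sublist dq := by
      have h1 : (dq.reverse.dropWhile p).Sublist dq.reverse := List.dropWhile_sublist p
      have := h1.reverse
      rw [List.reverse_reverse] at this
      rw [hkept, hpk]; exact this
    have hkmem : ∀ a ∈ kept, a ∈ dq := fun a ha => hsub.subset ha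
    -- every kept value strictly exceeds the pushed one
    have hkeptgt : ∀ a ∈ kept, pvV mush (k-2) < pvV mush a := by
      intro a ha
      rw [hkept, hpk, List.mem_reverse] at ha
      rcases hr : dq.reverse.dropWhile p with _ | ⟨h0, rest⟩
      · rw [hr] at ha; cases ha
      · have hh0 : ¬ p h0 = true := by
          simp [pvDropWhile_head p dq.reverse h0 rest hr]
        rw [hp] at hh0; simp only [decide_eq_true_eq, not_le] at hh0
        have hpw : (dq.reverse.dropWhile p).Pairwise (fun a b => pvV mush a ≤ pvV mush b) := by
          refine List.Pairwise.sublist (List.dropWhile_sublist p) ?_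
          rw [List.pairwise_reverse]; exact hval
        rw [hr] at hpw ha
        rcases List.mem_cons.mp ha with h | h
        · exact h ▸ hh0
        · exact lt_of_lt_of_le hh0 ((List.pairwise_cons.mp hpw).1 a h)
    -- a dropped element is dominated by the pushed one
    have hdropped : ∀ a ∈ dq, a ∉ kept → pvV mush a ≤ pvV mush (k-2) := by
      intro a ha hnk
      have ha' : a ∈ dq.reverse := List.mem_reverse.mpr ha
      rw [← List.takeWhile_append_dropWhile (p := p) (l := dq.reverse)] at ha'
      rcases List.mem_append.mp ha' with h | h
      · have := List.mem_takeWhile_imp h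
        rw [hp] at this; simpa using this
      · exact absurd (by rw [hkept, hpk, List.mem_reverse]; exact h) hnk
    -- the pushed list
    have hmem1 : ∀ d ∈ kept ++ [k-2], 2*k-4-t ≤ d ∧ 0 ≤ d ∧ d ≤ k-2 := by
      intro d hd
      rcases List.mem_append.mp hd with h | h
      · have := hmem d (hkmem d h); omega
      · simp at h; omega
    have hlt1 : (kept ++ [k-2]).Pairwise (· < ·) := by
      rw [List.pairwise_append]
      refine ⟨List.Pairwise.sublist hsub hlt, by simp, ?_⟩
      intro a ha b hb
      simp only [List.mem_singleton] at hb
      have := hmem a (hkmem a ha)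
      omega
    have hval1 : (kept ++ [k-2]).Pairwise (fun a b => pvV mush b ≤ pvV mush a) := by
      rw [List.pairwise_append]
      refine ⟨List.Pairwise.sublist hsub hval, by simp, ?_⟩
      intro a ha b hb
      simp only [List.mem_singleton] at hb
      subst hb
      exact le_of_lt (hkeptgt a ha)
    have hdom1 : ∀ j : Int, 2*k-2-t ≤ j → 0 ≤ j → j ≤ k-2 →
        ∃ d ∈ kept ++ [k-2], j ≤ d ∧ pvV mush j ≤ pvV mush d := by
      intro j h1 h2 h3
      by_cases hj : j = k - 2
      · exact ⟨k-2, by simp, by omega, by rw [hj]⟩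
      · obtain ⟨d, hd, hjd, hvd⟩ := hdom j (by omega) h2 (by omega)
        by_cases hdk : d ∈ kept
        · exact ⟨d, List.mem_append.mpr (Or.inl hdk), hjd, hvd⟩
        · exact ⟨k-2, by simp, by omega,
            le_trans hvd (hdropped d hd hdk)⟩
    -- now the front drop
    unfold pvInv
    set dq2 := (kept ++ [k-2]).dropWhile (fun d => decide (d < 2*k-2-t)) with hdq2
    have hsub2 : dq2.Sublist (kept ++ [k-2]) := List.dropWhile_sublist _
    refine ⟨?_, List.Pairwise.sublist hsub2 hlt1, List.Pairwise.sublist hsub2 hval1, ?_⟩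
    · intro d hd
      have h1 := pvDropWhile_lb (2*k-2-t) (kept ++ [k-2]) hlt1 d hd
      have h2 := hmem1 d (hsub2.subset hd)
      omega
    · intro j h1 h2 h3
      obtain ⟨d, hd, hjd, hvd⟩ := hdom1 j h1 h2 h3
      refine ⟨d, ?_, hjd, hvd⟩
      exact pvMem_dropWhile _ _ d hd (by simp; omega)

theorem pvPS_succ (mush : List Int) (k : Int) (h1 : 1 ≤ k) (h2 : k ≤ (mush.length:Int)) :
    pvPS mush k = pvPS mush (k-1) + pvV mush (k-1) := by
  have hlt : (k-1).toNat < mush.length := by omega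
  have hsucc : k.toNat = (k-1).toNat + 1 := by omega
  rw [pvPS, pvPS, hsucc]
  unfold pvV
  rw [PySem.List.pyGetD_eq_getElem _ 0 (by omega) (by omega)]
  exact List.sum_take_succ mush _ hlt

-- one loop iteration of B computes the reference step and preserves the invariant
theorem pvStepB_eq (n t k : Int) (mush : List Int) (hn : n ≤ (mush.length:Int))
    (hk1 : 1 ≤ k) (hkt : k ≤ t) (hkn : k + 1 ≤ n)
    (s : Int × Int × List Int)
    (hs2 : s.2.1 = pvPS mush (k-1)) (hinv : pvInv mush t (k-1) s.2.2) :
    (pvStepB mush t s k).1 = pvStep mush t s.1 k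
    ∧ (pvStepB mush t s k).2.1 = pvPS mush k
    ∧ pvInv mush t k (pvStepB mush t s k).2.2 := by
  have hinv' : pvInv mush t k (pvStepDq mush t k s.2.2) :=
    pvInv_step mush t k s.2.2 hk1 hkt hinv
  have hpfx : s.2.1 + PySem.List.pyGetD mush (k - 1) 0 = pvPS mush k := by
    rw [hs2, pvPS_succ mush k hk1 (by omega)]; rfl
  refine ⟨?_, by simp only [pvStepB]; exact hpfx, by simp only [pvStepB]; exact hinv'⟩
  -- the best-value component
  show (pvStepB mush t s k).1 = pvStep mush t s.1 k
  unfold pvStep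
  rw [List.foldl_append]
  by_cases hk2 : 2 ≤ k
  case neg =>
    -- k = 1: empty window, extra = [0]
    have hk1' : k = 1 := by omega
    subst hk1'
    have hdq : pvStepDq mush t 1 s.2.2 = [] := pvInv_empty mush t 1 _ (by omega) hinv'
    have hwin : pvWin t 1 = [] := by
      unfold pvWin
      exact PySem.List.pyRange_one_eq_nil (by omega)
    have hextra : pvExtra t 1 = [(0:Int)] := by
      unfold pvExtra; rw [if_pos (by omega)]
    rw [hwin, hextra]
    simp only [pvStepB, hdq, List.foldl_nil, List.foldl_cons]
    rw [if_pos (by omega : 2 * (1:Int) - 2 ≤ t)]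
    rw [hpfx]
    rfl
  case pos =>
    -- k ≥ 2: the deque head is the window maximum
    obtain ⟨d0, rest, hdq, hhead⟩ := pvInv_head mush t k _ hk2 hkt hinv'
    have hd0mem := hinv'.1 d0 (by rw [hdq]; exact List.mem_cons_self ..)
    have hd0win : d0 ∈ pvWin t k := by
      unfold pvWin
      rw [PySem.List.mem_pyRange_one]
      omega
    have hwinfold : (pvWin t k).foldl (fun a i => max a (pvPS mush k + pvV mush i))
        (max s.1 (pvPS mush k)) = max (max s.1 (pvPS mush k)) (pvPS mush k + pvV mush d0) := by
      apply le_antisymm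
      · apply pvFold_ub
        · exact le_max_left _ _
        · intro i hi
          unfold pvWin at hi
          rw [PySem.List.mem_pyRange_one] at hi
          have := hhead i (by omega) (by omega) (by omega)
          omega
      · apply max_le
        · exact (pvFold_lb _ _ _).1
        · exact (pvFold_lb _ _ _).2 d0 hd0win
    rw [hwinfold]
    simp only [pvStepB, hdq]
    rw [hpfx]
    by_cases hx : 2 * k - 2 ≤ t
    · have hextra : pvExtra t k = [(0:Int)] := by unfold pvExtra; rw [if_pos hx]
      rw [hextra, if_pos hx]
      rfl
    · have hextra : pvExtra t k = ([] : List Int) := by unfold pvExtra; rw [if_neg hx]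
      rw [hextra, if_neg hx]
      rfl

-- B's loop state agrees with the reference fold throughout
theorem pvB_fold (n t : Int) (mush : List Int) (hn : n ≤ (mush.length:Int)) (c : Nat)
    (hc : 1 + (c:Int) ≤ min n (t+1)) :
    ((PySem.List.pyRange 1 (1+(c:Int)) 1).foldl (pvStepB mush t)
        (PySem.List.pyGetD mush 0 0, 0, ([]:List Int))).1
      = (PySem.List.pyRange 1 (1+(c:Int)) 1).foldl (pvStep mush t) (pvV mush 0)
    ∧ ((PySem.List.pyRange 1 (1+(c:Int)) 1).foldl (pvStepB mush t)
        (PySem.List.pyGetD mush 0 0, 0, ([]:List Int))).2.1 = pvPS mush (c:Int)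
    ∧ pvInv mush t (c:Int) ((PySem.List.pyRange 1 (1+(c:Int)) 1).foldl (pvStepB mush t)
        (PySem.List.pyGetD mush 0 0, 0, ([]:List Int))).2.2 := by
  induction c with
  | zero =>
    simp only [Nat.cast_zero, add_zero]
    rw [PySem.List.pyRange_one_eq_nil (le_refl _)]
    refine ⟨rfl, by simp [pvPS], ?_⟩
    exact ⟨by simp, by simp, by simp, fun j h1 h2 h3 => by omega⟩
  | succ c ih =>
    have hcast : (1:Int) + ((c+1:Nat):Int) = (1+(c:Int)) + 1 := by push_cast; ring
    rw [hcast, PySem.List.pyRange_one_succ_right (by omega), List.foldl_append, List.foldl_append]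
    have hc' : 1 + (c:Int) ≤ min n (t+1) := by omega
    obtain ⟨ih1, ih2, ih3⟩ := ih hc'
    have hk1 : 1 ≤ 1 + (c:Int) := by omega
    have hs2 : ((PySem.List.pyRange 1 (1+(c:Int)) 1).foldl (pvStepB mush t)
        (PySem.List.pyGetD mush 0 0, 0, ([]:List Int))).2.1 = pvPS mush ((1+(c:Int)) - 1) := by
      rw [ih2]; norm_num
    have hinv : pvInv mush t ((1+(c:Int)) - 1) ((PySem.List.pyRange 1 (1+(c:Int)) 1).foldl
        (pvStepB mush t) (PySem.List.pyGetD mush 0 0, 0, ([]:List Int))).2.2 := by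
      have : (1+(c:Int)) - 1 = (c:Int) := by ring
      rw [this]; exact ih3
    obtain ⟨e1, e2, e3⟩ := pvStepB_eq n t (1+(c:Int)) mush hn hk1 (by omega) (by omega)
      _ hs2 hinv
    simp only [List.foldl_cons, List.foldl_nil]
    refine ⟨?_, ?_, ?_⟩
    · rw [e1, ih1]
    · rw [e2]; congr 1; push_cast; ring
    · have : ((c:Int)) + 1 = 1 + (c:Int) := by ring
      rw [Nat.cast_add, Nat.cast_one, this]
      exact e3

-- ===== VERDICT (by name: the statement is the Claim_ definition above) =====
theorem max_mushrooms_spec : Claim_equal_max_mushrooms := by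
  intro n t mush _ hpre
  unfold Spec_max_mushrooms
  obtain ⟨hne, hpre2⟩ := hpre
  by_cases ht : t = 0
  · subst ht; simp [max_mushrooms, max_mushrooms_alt]
  · have hn : n ≤ (mush.length : Int) := by
      rcases hpre2 with h | h
      · exact absurd h ht
      · exact h
    rw [pvA_eq_foldSpec n t mush ht hn, pvAlt_eq_foldB n t mush ht]
    by_cases hlim : min n (t+1) ≤ 1
    · rw [PySem.List.pyRange_one_eq_nil hlim]
      simp [pvV]
    · have hc : 1 + (((min n (t+1)) - 1).toNat : Int) = min n (t+1) := by omega
      have h := (pvB_fold n t mush hn ((min n (t+1)) - 1).toNat (by omega)).1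
      rw [hc] at h
      exact h.symm
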